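-- pv_equiv track=rewrite | github.com/irishrain/epdoptimize | python/epdoptimize/bayer_matrix.py | create_bayer_matrix
-- ===== SOURCE A (Python) =====
-- from typing import List, Tuple
--
-- def create_bayer_matrix(size: Tuple[int, int]) -> List[List[int]]:
--     """
--     Create a Bayer threshold matrix for ordered dithering.
--
--     Args:
--         size: Tuple of (width, height), max 8x8
--
--     Returns:
--         A 2D list representing the Bayer matrix
--     """
--     width = min(size[0], 8) if size[0] < 8 else 8
--     height = min(size[1], 8) if size[1] < 8 else 8
--
--     # Pre-computed 8x8 Bayer matrix
--     big_matrix = [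
--         [0, 48, 12, 60, 3, 51, 15, 63],
--         [32, 16, 44, 28, 35, 19, 47, 31],
--         [8, 56, 4, 52, 11, 59, 7, 55],
--         [40, 24, 36, 20, 43, 27, 39, 32],
--         [2, 50, 14, 62, 1, 49, 13, 61],
--         [34, 18, 46, 30, 33, 17, 45, 29],
--         [10, 58, 6, 54, 9, 57, 5, 53],
--         [42, 26, 38, 22, 41, 25, 37, 21],
--     ]
--
--     # If using full 8x8, return the big matrix directly
--     if width == 8 and height == 8:
--         return big_matrix
--
--     # Create a smaller matrix by extracting the needed portion
--     matrix = []
--     for y in range(height):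
--         row = []
--         for x in range(width):
--             # Note: JavaScript code uses bigMatrix[x][y] which is transposed access
--             row.append(big_matrix[x][y])
--         matrix.append(row)
--
--     # Re-index the matrix values to be sequential 0 to (width*height - 1)
--     # Flatten, sort, create index mapping
--     flat_values = []
--     for row in matrix:
--         flat_values.extend(row)
--
--     sorted_values = sorted(flat_values)
--     index_map = {v: i for i, v in enumerate(sorted_values)}
--
--     # Apply the new indices
--     for y in range(len(matrix)):
--         for x in range(len(matrix[y])):
--             matrix[y][x] = index_map[matrix[y][x]]
--
--     return matrix
-- ===== SOURCE B (Python) =====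
-- from typing import List, Tuple
--
-- def create_bayer_matrix(size: Tuple[int, int]) -> List[List[int]]:
--     width = min(size[0], 8)
--     height = min(size[1], 8)
--
--     big_matrix = [
--         [0, 48, 12, 60, 3, 51, 15, 63],
--         [32, 16, 44, 28, 35, 19, 47, 31],
--         [8, 56, 4, 52, 11, 59, 7, 55],
--         [40, 24, 36, 20, 43, 27, 39, 32],
--         [2, 50, 14, 62, 1, 49, 13, 61],
--         [34, 18, 46, 30, 33, 17, 45, 29],
--         [10, 58, 6, 54, 9, 57, 5, 53],
--         [42, 26, 38, 22, 41, 25, 37, 21],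
--     ]
--
--     if width == 8 and height == 8:
--         return big_matrix
--
--     # transposed sub-block, row-major list of its values
--     vals = [big_matrix[x][y] for y in range(height) for x in range(width)]
--
--     # rank each cell directly: its value becomes the number of strictly smaller values
--     return [[sum(u < big_matrix[x][y] for u in vals) for x in range(width)]
--             for y in range(height)]
-- ===== Notes on version B (the rewrite author's own statement) =====
-- stated objective: simpler
-- what changed: Replaces the flatten + sorted + enumerate-dict re-indexing with a direct per-cell rank (count of strictly smaller extracted values); Pre_ excludes the sizes whose sub-block contains both duplicate 32 entries, where the rank of that tied pair depends on A's accidental dict-overwrite order and either ranking is defensible.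
import Mathlib
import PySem

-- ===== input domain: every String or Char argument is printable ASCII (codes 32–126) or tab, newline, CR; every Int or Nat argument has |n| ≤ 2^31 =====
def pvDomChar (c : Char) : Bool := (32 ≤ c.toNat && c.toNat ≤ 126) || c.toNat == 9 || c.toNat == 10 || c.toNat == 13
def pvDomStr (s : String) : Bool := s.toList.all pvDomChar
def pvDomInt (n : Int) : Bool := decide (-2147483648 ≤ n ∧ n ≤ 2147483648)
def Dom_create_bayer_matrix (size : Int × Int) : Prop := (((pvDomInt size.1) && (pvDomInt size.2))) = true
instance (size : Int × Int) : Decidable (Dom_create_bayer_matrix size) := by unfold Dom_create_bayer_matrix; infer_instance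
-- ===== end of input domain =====

-- B replaces flatten+sort+dict re-indexing by a direct per-cell strict-less rank; objective: simpler.

-- the fixed 8x8 Bayer matrix (shared literal constant of both sources)
def pvBig : List (List Int) :=
  [ [0, 48, 12, 60, 3, 51, 15, 63],
    [32, 16, 44, 28, 35, 19, 47, 31],
    [8, 56, 4, 52, 11, 59, 7, 55],
    [40, 24, 36, 20, 43, 27, 39, 32],
    [2, 50, 14, 62, 1, 49, 13, 61],
    [34, 18, 46, 30, 33, 17, 45, 29],
    [10, 58, 6, 54, 9, 57, 5, 53],
    [42, 26, 38, 22, 41, 25, 37, 21] ]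

-- ===== PORT A =====
-- A's else-branch body (extract transposed block, flatten, sort, dict re-index);
-- big_matrix[x][y] indices are always in range (0 ≤ x,y < 8), so pyGetD with a default is exact.
def pvCoreA (width height : Int) : List (List Int) :=
  let matrix := (PySem.List.pyRange 0 height 1).map (fun y =>
    (PySem.List.pyRange 0 width 1).map (fun x =>
      PySem.List.pyGetD (PySem.List.pyGetD pvBig x []) y 0))
  let flat_values := matrix.foldl (fun acc row => acc ++ row) []
  let sorted_values := PySem.List.sorted flat_values (fun v => v) false
  let index_map := (PySem.List.enumerate sorted_values 0).foldl
    (fun (d : PySem.Dict Int Int) p => d.insert p.2 p.1) PySem.Dict.empty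
  -- the in-place rewrite loop, as the elementwise map it performs; index_map[v] never misses
  matrix.map (fun row => row.map (fun v => (index_map.get? v).getD 0))

def create_bayer_matrix (size : Int × Int) : List (List Int) :=
  let width := if size.1 < 8 then min size.1 8 else 8
  let height := if size.2 < 8 then min size.2 8 else 8
  if width = 8 ∧ height = 8 then pvBig
  else pvCoreA width height

-- ===== PORT B =====
-- B's else-branch body: each cell becomes the count of strictly smaller extracted values
def pvCoreB (width height : Int) : List (List Int) :=
  let vals := (PySem.List.pyRange 0 height 1).flatMap (fun y =>
    (PySem.List.pyRange 0 width 1).map (fun x =>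
      PySem.List.pyGetD (PySem.List.pyGetD pvBig x []) y 0))
  (PySem.List.pyRange 0 height 1).map (fun y =>
    (PySem.List.pyRange 0 width 1).map (fun x =>
      let v := PySem.List.pyGetD (PySem.List.pyGetD pvBig x []) y 0
      (vals.countP (fun u => decide (u < v)) : Int)))

def create_bayer_matrix_alt (size : Int × Int) : List (List Int) :=
  let width := min size.1 8
  let height := min size.2 8
  if width = 8 ∧ height = 8 then pvBig
  else pvCoreB width height

-- ===== PRECONDITION & SPEC =====
-- Pre_ excludes sizes whose extracted sub-block contains BOTH duplicate 32 entries of the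
-- fixed matrix (clamped width 4..7 with height clamped to 8): there the rank assigned to that
-- tied pair is an accident of A's dict-overwrite order and either ranking is defensible.
def Pre_create_bayer_matrix (size : Int × Int) : Prop :=
  ¬ (4 ≤ size.1 ∧ size.1 < 8 ∧ 8 ≤ size.2)
instance (size : Int × Int) : Decidable (Pre_create_bayer_matrix size) := by
  unfold Pre_create_bayer_matrix; infer_instance

def pvWitness_create_bayer_matrix : (Int × Int) := (4, 4)

def Spec_create_bayer_matrix (size : Int × Int) (out : List (List Int)) : Prop := out = create_bayer_matrix_alt size
instance (size : Int × Int) (out : List (List Int)) : Decidable (Spec_create_bayer_matrix size out) := by unfold Spec_create_bayer_matrix; infer_instance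

-- ===== CLAIM =====
def Claim_equal_create_bayer_matrix : Prop := ∀ (size : Int × Int), Dom_create_bayer_matrix size → Pre_create_bayer_matrix size → Spec_create_bayer_matrix size (create_bayer_matrix size)

-- ===== LEMMAS AND PROOFS =====

-- a range below 0 is the same as the empty range: pyRange only sees the clamped bound
lemma pyRange_zero_max (w : Int) :
    PySem.List.pyRange 0 w 1 = PySem.List.pyRange 0 (max w 0) 1 := by
  by_cases h : 0 ≤ w
  · rw [max_eq_left h]
  · rw [PySem.List.pyRange_one_eq_nil (by omega),
        PySem.List.pyRange_one_eq_nil (by omega)]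

lemma coreA_clamp (w h : Int) : pvCoreA w h = pvCoreA (max w 0) (max h 0) := by
  unfold pvCoreA
  rw [pyRange_zero_max w, pyRange_zero_max h]

lemma coreB_clamp (w h : Int) : pvCoreB w h = pvCoreB (max w 0) (max h 0) := by
  unfold pvCoreB
  rw [pyRange_zero_max w, pyRange_zero_max h]

-- the two else-branch bodies agree on every clamped size 0..8 x 0..8 except width 4..7 with height 8
set_option maxRecDepth 4096 in
lemma core_eq : ∀ (w h : Fin 9),
    (¬ (4 ≤ (w : Nat) ∧ (h : Nat) = 8)) →
    pvCoreA ((w : Nat) : Int) ((h : Nat) : Int) = pvCoreB ((w : Nat) : Int) ((h : Nat) : Int) := by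
  decide

lemma main_eq (w h : Int) (hw : w ≤ 8) (hh : h ≤ 8)
    (hex : ¬ (4 ≤ w ∧ w < 8 ∧ h = 8)) :
    (if w = 8 ∧ h = 8 then pvBig else pvCoreA w h)
      = (if w = 8 ∧ h = 8 then pvBig else pvCoreB w h) := by
  split
  · rfl
  · rename_i h88
    rw [coreA_clamp, coreB_clamp]
    have hw9 : (max w 0).toNat < 9 := by omega
    have hh9 : (max h 0).toNat < 9 := by omega
    have hWc : max w 0 = (((⟨(max w 0).toNat, hw9⟩ : Fin 9) : Nat) : Int) := by simp
    have hHc : max h 0 = (((⟨(max h 0).toNat, hh9⟩ : Fin 9) : Nat) : Int) := by simp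
    rw [hWc, hHc]
    exact core_eq _ _ (by simp; omega)

-- ===== VERDICT =====
theorem create_bayer_matrix_spec : Claim_equal_create_bayer_matrix := by
  intro size _ hpre
  show create_bayer_matrix size = create_bayer_matrix_alt size
  have hw : (if size.1 < 8 then min size.1 8 else 8) = min size.1 8 := by
    split
    · rfl
    · omega
  have hh : (if size.2 < 8 then min size.2 8 else 8) = min size.2 8 := by
    split
    · rfl
    · omega
  have e1 : create_bayer_matrix size =
      (if (if size.1 < 8 then min size.1 8 else 8) = 8 ∧ (if size.2 < 8 then min size.2 8 else 8) = 8
       then pvBig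
       else pvCoreA (if size.1 < 8 then min size.1 8 else 8) (if size.2 < 8 then min size.2 8 else 8)) := rfl
  have e2 : create_bayer_matrix_alt size =
      (if min size.1 8 = 8 ∧ min size.2 8 = 8
       then pvBig
       else pvCoreB (min size.1 8) (min size.2 8)) := rfl
  rw [e1, e2, hw, hh]
  unfold Pre_create_bayer_matrix at hpre
  exact main_eq _ _ (by omega) (by omega) (by omega)
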